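-- pv_equiv track=rewrite | github.com/ghufr/maingame-automation | sandbox/test.py | calc
-- ===== SOURCE A (Python) =====
-- def calc(occupancy):
--     avail = 0
--     empty = 0
--     reserved = 0
--     total = 0
--     for row in occupancy:
--         for col in row:
--             total += 1
--             if (col == 0):
--                 avail += 1
--             elif (col == 1):
--                 reserved += 1
--             else:
--                 empty += 1
--     return avail, empty, reserved, total
-- ===== SOURCE B (Python) =====
-- def calc(occupancy):
--     cells = [c for row in occupancy for c in row]
--     total = len(cells)
--     avail = cells.count(0)
--     reserved = cells.count(1)
--     empty = total - avail - reserved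
--     return avail, empty, reserved, total
-- ===== Notes on version B (the rewrite author's own statement) =====
-- stated objective: simpler
-- what changed: Replaced the nested loop with four running counters by a flatten plus list.count calls, deriving empty by subtraction instead of an else branch.
import Mathlib
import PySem

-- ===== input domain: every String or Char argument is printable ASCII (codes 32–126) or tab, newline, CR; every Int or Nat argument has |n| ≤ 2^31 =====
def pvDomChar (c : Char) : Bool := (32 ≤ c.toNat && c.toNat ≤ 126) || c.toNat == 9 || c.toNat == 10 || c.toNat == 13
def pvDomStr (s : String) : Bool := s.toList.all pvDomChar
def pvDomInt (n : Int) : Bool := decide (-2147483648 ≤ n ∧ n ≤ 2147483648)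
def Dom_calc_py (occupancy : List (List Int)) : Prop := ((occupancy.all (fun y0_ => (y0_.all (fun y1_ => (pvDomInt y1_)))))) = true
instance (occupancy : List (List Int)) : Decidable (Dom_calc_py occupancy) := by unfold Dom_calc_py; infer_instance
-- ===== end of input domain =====

-- B replaces A's nested counting loop by flattening the grid and using list counts (empty derived by subtraction): simpler decomposition, same O(n) cost.


-- ===== PORT A =====
-- step of A's inner loop: total += 1, then the if/elif/else on the cell
def pvCalcStep (s : Int × Int × Int × Int) (col : Int) : Int × Int × Int × Int :=
  match s with
  | (avail, empty, reserved, total) =>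
    let total := total + 1
    if col == 0 then (avail + 1, empty, reserved, total)
    else if col == 1 then (avail, empty, reserved + 1, total)
    else (avail, empty + 1, reserved, total)

def calc_py (occupancy : List (List Int)) : Int × Int × Int × Int :=
  occupancy.foldl (fun s row => row.foldl pvCalcStep s) (0, 0, 0, 0)

-- ===== PORT B =====
def calc_py_alt (occupancy : List (List Int)) : Int × Int × Int × Int :=
  let cells := occupancy.flatten
  let total : Int := cells.length
  let avail : Int := cells.count 0
  let reserved : Int := cells.count 1
  let empty : Int := total - avail - reserved
  (avail, empty, reserved, total)

-- ===== PRECONDITION & SPEC =====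
def Spec_calc_py (occupancy : List (List Int)) (out : Int × Int × Int × Int) : Prop := out = calc_py_alt occupancy
instance (occupancy : List (List Int)) (out : Int × Int × Int × Int) : Decidable (Spec_calc_py occupancy out) := by unfold Spec_calc_py; infer_instance

-- ===== CLAIM (what is proved, stated in full; the proofs are below) =====
def Claim_equal_calc_py : Prop := ∀ (occupancy : List (List Int)), Dom_calc_py occupancy → Spec_calc_py occupancy (calc_py occupancy)

-- ===== LEMMAS AND PROOFS =====
lemma pvCalcStep_fold (xs : List Int) (a e r t : Int) :
    xs.foldl pvCalcStep (a, e, r, t) =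
      (a + xs.count 0, e + ((xs.length : Int) - xs.count 0 - xs.count 1),
       r + xs.count 1, t + xs.length) := by
  induction xs generalizing a e r t with
  | nil => simp
  | cons x xs ih =>
    by_cases h0 : x = 0
    · subst h0
      simp [List.foldl_cons, pvCalcStep, ih]
      push_cast
      omega
    · by_cases h1 : x = 1
      · subst h1
        simp [List.foldl_cons, pvCalcStep, ih]
        push_cast
        omega
      · simp [List.foldl_cons, pvCalcStep, h0, h1, ih]
        push_cast
        omega

-- ===== VERDICT (by name: the statement is the Claim_ definition above) =====
theorem calc_py_spec : Claim_equal_calc_py := by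
  intro occupancy _
  show calc_py occupancy = calc_py_alt occupancy
  rw [calc_py, ← List.foldl_flatten, pvCalcStep_fold]
  simp [calc_py_alt]
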